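-- pv_equiv track=rewrite | github.com/rayah97/python_homeworks | functions_from_Tigran.py | words_with_most_vowels
-- ===== SOURCE A (Python) =====
-- def words_with_most_vowels(words):
--     vowels = "AEIOUaeiou"
--     max_vowels = 0
--     most_vowel_words = []
--     for word in words:
--         num_vowels = sum(char in vowels for char in word)
--         if num_vowels > max_vowels:
--             max_vowels = num_vowels
--             most_vowel_words = [word]
--         elif num_vowels == max_vowels:
--             most_vowel_words.append(word)
--     return most_vowel_words
-- ===== SOURCE B (Python) =====
-- def words_with_most_vowels(words):
--     vowels = "AEIOUaeiou"
--     counts = [sum(c in vowels for c in w) for w in words]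
--     max_count = max(counts, default=0)
--     return [w for w, c in zip(words, counts) if c == max_count]
-- ===== Notes on version B (the rewrite author's own statement) =====
-- stated objective: simpler
-- what changed: Replaces the fused running-max-and-collect loop (which rebuilds or extends the result list as the max evolves) with three plain passes: build the vowel-count table, take its max (default 0), and filter the words whose count equals it.
import Mathlib
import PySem

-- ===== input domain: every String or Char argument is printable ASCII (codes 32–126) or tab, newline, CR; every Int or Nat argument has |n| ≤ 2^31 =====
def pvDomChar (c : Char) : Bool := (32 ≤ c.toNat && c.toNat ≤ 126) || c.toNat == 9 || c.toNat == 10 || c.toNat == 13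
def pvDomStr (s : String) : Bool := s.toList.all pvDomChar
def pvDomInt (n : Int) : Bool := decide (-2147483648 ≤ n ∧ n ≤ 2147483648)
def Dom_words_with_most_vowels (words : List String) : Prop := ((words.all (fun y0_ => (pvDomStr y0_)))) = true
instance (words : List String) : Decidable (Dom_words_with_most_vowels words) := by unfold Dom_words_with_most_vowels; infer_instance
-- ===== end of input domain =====

-- B replaces A's fused running-max-and-collect loop by three plain passes (count table, max with default 0, filter); same return value, objective: simpler.

-- ===== PORT A =====
-- sum(char in vowels for char in word), shared verbatim by both Pythons
def pvVowelSum (w : String) : Int :=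
  w.toList.foldl (fun a c => a + (if c ∈ "AEIOUaeiou".toList then 1 else 0)) 0

def words_with_most_vowels (words : List String) : List String :=
  (words.foldl (fun (st : Int × List String) word =>
      let num_vowels := pvVowelSum word
      if num_vowels > st.1 then (num_vowels, [word])
      else if num_vowels = st.1 then (st.1, st.2 ++ [word])
      else st) (0, [])).2

-- ===== PORT B =====
def words_with_most_vowels_alt (words : List String) : List String :=
  let counts := words.map pvVowelSum
  let max_count := (PySem.List.max? counts (fun y => y)).getD 0
  ((words.zip counts).filter (fun wc => wc.2 == max_count)).map Prod.fst

-- ===== PRECONDITION & SPEC =====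
def Spec_words_with_most_vowels (words : List String) (out : List String) : Prop := out = words_with_most_vowels_alt words
instance (words : List String) (out : List String) : Decidable (Spec_words_with_most_vowels words out) := by unfold Spec_words_with_most_vowels; infer_instance

-- ===== CLAIM (what is proved, stated in full; the proofs are below) =====
def Claim_equal_words_with_most_vowels : Prop := ∀ (words : List String), Dom_words_with_most_vowels words → Spec_words_with_most_vowels words (words_with_most_vowels words)

-- ===== LEMMAS AND PROOFS =====

theorem pvVowelSum_nonneg (w : String) : 0 ≤ pvVowelSum w := by
  unfold pvVowelSum
  suffices h : ∀ (l : List Char) (n : Int),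
      n ≤ l.foldl (fun a c => a + (if c ∈ "AEIOUaeiou".toList then 1 else 0)) n from
    h w.toList 0
  intro l
  induction l with
  | nil => intro n; simp
  | cons c t ih =>
    intro n
    simp only [List.foldl_cons]
    exact le_trans (by split <;> omega) (ih _)

theorem foldl_max_ge (l : List Int) (m : Int) : m ≤ l.foldl max m := by
  induction l generalizing m with
  | nil => simp
  | cons x t ih => exact le_trans (le_max_left m x) (ih _)

-- the invariant of A's loop
theorem loopA_char (ws : List String) : ∀ (m : Int) (acc : List String),
    (ws.foldl (fun (st : Int × List String) word =>
      let num_vowels := pvVowelSum word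
      if num_vowels > st.1 then (num_vowels, [word])
      else if num_vowels = st.1 then (st.1, st.2 ++ [word])
      else st) (m, acc)).2 =
    (if (ws.map pvVowelSum).foldl max m > m then [] else acc)
      ++ ws.filter (fun w => pvVowelSum w == (ws.map pvVowelSum).foldl max m) := by
  induction ws with
  | nil => intro m acc; simp
  | cons w t ih =>
    intro m acc
    obtain ⟨n, hn⟩ : ∃ n, pvVowelSum w = n := ⟨_, rfl⟩
    simp only [List.foldl_cons, List.map_cons, List.filter_cons, hn]
    by_cases h1 : n > m
    · simp only [if_pos h1]
      rw [ih n [w]]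
      have hM : (t.map pvVowelSum).foldl max (max m n) = (t.map pvVowelSum).foldl max n := by
        congr 1; omega
      rw [hM]
      have hge : n ≤ (t.map pvVowelSum).foldl max n := foldl_max_ge _ _
      have hgtm : (t.map pvVowelSum).foldl max n > m := by omega
      simp only [if_pos hgtm]
      by_cases h2 : (t.map pvVowelSum).foldl max n > n
      · simp only [if_pos h2]
        have hb : (n == (t.map pvVowelSum).foldl max n) = false := by
          simp; omega
        simp [hb]
      · have he : (t.map pvVowelSum).foldl max n = n := by omega
        simp only [he]
        simp
    · simp only [if_neg h1]
      have hM : (t.map pvVowelSum).foldl max (max m n) = (t.map pvVowelSum).foldl max m := by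
        congr 1; omega
      rw [hM]
      by_cases h2 : n = m
      · simp only [if_pos h2]
        rw [ih m (acc ++ [w])]
        by_cases h3 : (t.map pvVowelSum).foldl max m > m
        · simp only [if_pos h3]
          have hb : (n == (t.map pvVowelSum).foldl max m) = false := by
            simp; omega
          simp [hb]
        · have he : (t.map pvVowelSum).foldl max m = m := by
            have := foldl_max_ge (t.map pvVowelSum) m; omega
          simp only [he]
          have hb : (n == m) = true := by simp [h2]
          simp [hb]
      · simp only [if_neg h2]
        rw [ih m acc]
        have hge : m ≤ (t.map pvVowelSum).foldl max m := foldl_max_ge _ _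
        have hb : (n == (t.map pvVowelSum).foldl max m) = false := by
          simp; omega
        simp [hb]
  
-- B's zip-filter-map equals a plain filter of the words
theorem zip_filter_map (ws : List String) (M : Int) :
    ((ws.zip (ws.map pvVowelSum)).filter (fun wc => wc.2 == M)).map Prod.fst =
    ws.filter (fun w => pvVowelSum w == M) := by
  induction ws with
  | nil => rfl
  | cons w t ih =>
    by_cases h : (pvVowelSum w == M) = true
    · simp [List.zip_cons_cons, h, ih]
    · simp [List.zip_cons_cons, h, ih]

theorem maxB_eq (ws : List String) :
    (PySem.List.max? (ws.map pvVowelSum) (fun y => y)).getD 0 =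
    (ws.map pvVowelSum).foldl max 0 := by
  cases ws with
  | nil => rfl
  | cons w t =>
    simp only [List.map_cons]
    rw [PySem.List.max?_id_cons]
    simp only [Option.getD_some, List.foldl_cons]
    have h0 : max 0 (pvVowelSum w) = pvVowelSum w := by
      have := pvVowelSum_nonneg w; omega
    rw [h0]

-- ===== VERDICT (by name: the statement is the Claim_ definition above) =====
theorem words_with_most_vowels_spec : Claim_equal_words_with_most_vowels := by
  intro words _
  unfold Spec_words_with_most_vowels words_with_most_vowels
  show _ = ((words.zip (words.map pvVowelSum)).filter
      (fun wc => wc.2 == (PySem.List.max? (words.map pvVowelSum) (fun y => y)).getD 0)).map Prod.fst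
  rw [loopA_char words 0 [], maxB_eq, zip_filter_map]
  split <;> simp
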